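-- pv_equiv track=rewrite | github.com/snehangsh/bookbot | main.py | get_count_letters
-- ===== SOURCE A (Python) =====
-- def get_count_letters(text):
--     dict ={}
--     for char in text:
--         if char.isalpha():
--             if char.lower() in dict:
--                 dict[char.lower()] +=1
--             else:
--                 dict[char.lower()] =1
--     return dict
-- ===== SOURCE B (Python) =====
-- def get_count_letters(text):
--     lowered = [c.lower() for c in text if c.isalpha()]
--     seen = []
--     for k in lowered:
--         if k not in seen:
--             seen.append(k)
--     return {k: lowered.count(k) for k in seen}
-- ===== Notes on version B (the rewrite author's own statement) =====
-- stated objective: alternative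
-- what changed: Instead of incrementally updating a hash map per character, B materialises the lowercased alphabetic character list, deduplicates it in first-occurrence order, and then counts each distinct letter with list.count in a dict comprehension.
import Mathlib
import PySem

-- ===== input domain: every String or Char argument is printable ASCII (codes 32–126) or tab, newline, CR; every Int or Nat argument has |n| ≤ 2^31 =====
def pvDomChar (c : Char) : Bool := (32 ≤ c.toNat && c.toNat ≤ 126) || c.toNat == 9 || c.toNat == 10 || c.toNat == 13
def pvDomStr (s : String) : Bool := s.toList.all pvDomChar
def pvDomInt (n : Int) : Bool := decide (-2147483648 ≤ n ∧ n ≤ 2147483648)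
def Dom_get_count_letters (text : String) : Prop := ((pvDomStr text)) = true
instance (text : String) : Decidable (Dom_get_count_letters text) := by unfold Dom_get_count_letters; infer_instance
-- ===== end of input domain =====

-- B replaces A's per-character hash-map update by: build the lowercased alphabetic list,
-- dedup it in first-occurrence order, then count each distinct letter in one comprehension (alternative decomposition, not faster).

-- ===== PORT A =====
def get_count_letters (text : String) : List (String × Int) :=
  (text.toList.foldl (fun d c =>
    if PySem.Chars.isalpha c then
      -- char.lower() on a 1-char string
      let k : String := String.ofList [PySem.Chars.lowerChar c]
      match (PySem.Dict.get? d k : Option Int) with   -- 'char.lower() in dict' then 'dict[...] += 1'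
      | some v => d.insert k (v + 1)
      | none   => d.insert k 1
    else d) PySem.Dict.empty).items

-- ===== PORT B =====
def get_count_letters_alt (text : String) : List (String × Int) :=
  let lowered := (text.toList.filter PySem.Chars.isalpha).map
                   (fun c => String.ofList [PySem.Chars.lowerChar c])
  let seen := lowered.foldl (fun s k => if s.contains k then s else s ++ [k]) []
  seen.map (fun k => (k, (lowered.count k : Int)))

-- ===== PRECONDITION & SPEC =====
def Spec_get_count_letters (text : String) (out : List (String × Int)) : Prop := out = get_count_letters_alt text
instance (text : String) (out : List (String × Int)) : Decidable (Spec_get_count_letters text out) := by unfold Spec_get_count_letters; infer_instance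

-- ===== CLAIM (what is proved, stated in full; the proofs are below) =====
def Claim_equal_get_count_letters : Prop := ∀ (text : String), Dom_get_count_letters text → Spec_get_count_letters text (get_count_letters text)

-- ===== LEMMAS AND PROOFS =====

-- A's branch on membership is, pointwise, the 'insert k (getD k 0 + 1)' counting step.
theorem pv_stepA_eq (d : PySem.Dict String Int) (k : String) :
    (match (PySem.Dict.get? d k : Option Int) with
      | some v => d.insert k (v + 1)
      | none   => d.insert k 1) = d.insert k (d.getD k 0 + 1) := by
  cases h : PySem.Dict.get? d k <;>
    simp [PySem.Dict.getD_eq_get?_getD, h]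

-- A's whole loop over the text is Counter(lowered).
theorem pv_foldA_eq_counter (cs : List Char) :
    cs.foldl (fun d c =>
      if PySem.Chars.isalpha c then
        let k : String := String.ofList [PySem.Chars.lowerChar c]
        match (PySem.Dict.get? d k : Option Int) with
        | some v => d.insert k (v + 1)
        | none   => d.insert k 1
      else d) PySem.Dict.empty
    = PySem.Dict.counter ((cs.filter PySem.Chars.isalpha).map
        (fun c => String.ofList [PySem.Chars.lowerChar c])) := by
  rw [PySem.List.foldl_if_eq_foldl_filter,
      ← List.foldl_map (f := fun c => String.ofList [PySem.Chars.lowerChar c])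
        (g := fun (d : PySem.Dict String Int) k =>
          match (PySem.Dict.get? d k : Option Int) with
          | some v => d.insert k (v + 1)
          | none   => d.insert k 1)]
  refine Eq.trans
      (PySem.List.foldl_congr_mem
        (g := fun (d : PySem.Dict String Int) k => d.insert k (d.getD k 0 + 1)) _ _ _ ?_)
      (PySem.Dict.foldl_insert_getD_add_one_eq_counter _)
  intro d k _
  exact pv_stepA_eq d k

-- ===== VERDICT (by name: the statement is the Claim_ definition above) =====
theorem get_count_letters_spec : Claim_equal_get_count_letters := by
  intro text _
  show get_count_letters text = get_count_letters_alt text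
  unfold get_count_letters get_count_letters_alt
  rw [pv_foldA_eq_counter, PySem.Dict.items_counter]
  -- B's 'seen' loop is literally PySem.Set.add folded, i.e. Set.ofList
  rfl
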